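-- pv_equiv track=rewrite | github.com/adis-zr/syracuse-graph | code/graph.py | bfs_distance_to
-- ===== SOURCE A (Python) =====
-- from collections import deque, defaultdict
-- from typing import Dict, List, Optional, Tuple
--
-- Vertex = Tuple[int, int]  # (r, d)
--
-- def bfs_distance_to(vertices: List[Vertex], adj: Dict[Vertex, List[Vertex]],
--                     target: set) -> Dict[Vertex, int]:
--     """Shortest distance from each vertex to the target set (reverse BFS)."""
--     radj: Dict[Vertex, List[Vertex]] = {v: [] for v in vertices}
--     for u in vertices:
--         for v in adj[u]:
--             radj[v].append(u)
--
--     dist = {v: 0 for v in target}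
--     q: deque[Vertex] = deque(target)
--     while q:
--         v = q.popleft()
--         for u in radj[v]:
--             if u not in dist:
--                 dist[u] = dist[v] + 1
--                 q.append(u)
--     return dist
-- ===== SOURCE B (Python) =====
-- def bfs_distance_to(vertices, adj, target):
--     """Shortest distance from each vertex to the target set (reverse BFS),
--     done level-synchronously: instead of a FIFO queue carrying per-vertex
--     distances, expand whole frontiers with an explicit level counter."""
--     radj = {v: [] for v in vertices}
--     for u in vertices:
--         for v in adj[u]:
--             radj[v].append(u)
--
--     dist = {v: 0 for v in target}
--     frontier = list(target)
--     d = 0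
--     while frontier:
--         d += 1
--         nxt = []
--         for v in frontier:
--             for u in radj[v]:
--                 if u not in dist:
--                     dist[u] = d
--                     nxt.append(u)
--         frontier = nxt
--     return dist
-- ===== Notes on version B (the rewrite author's own statement) =====
-- stated objective: alternative
-- what changed: The single FIFO-queue BFS loop (popleft, dist[u]=dist[v]+1) is replaced by a level-synchronous BFS: an outer while over whole frontiers with an explicit level counter d and a nested per-level expansion building the next frontier, with no per-vertex distance lookups; the reverse-adjacency build is kept identical.
import Mathlib
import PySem

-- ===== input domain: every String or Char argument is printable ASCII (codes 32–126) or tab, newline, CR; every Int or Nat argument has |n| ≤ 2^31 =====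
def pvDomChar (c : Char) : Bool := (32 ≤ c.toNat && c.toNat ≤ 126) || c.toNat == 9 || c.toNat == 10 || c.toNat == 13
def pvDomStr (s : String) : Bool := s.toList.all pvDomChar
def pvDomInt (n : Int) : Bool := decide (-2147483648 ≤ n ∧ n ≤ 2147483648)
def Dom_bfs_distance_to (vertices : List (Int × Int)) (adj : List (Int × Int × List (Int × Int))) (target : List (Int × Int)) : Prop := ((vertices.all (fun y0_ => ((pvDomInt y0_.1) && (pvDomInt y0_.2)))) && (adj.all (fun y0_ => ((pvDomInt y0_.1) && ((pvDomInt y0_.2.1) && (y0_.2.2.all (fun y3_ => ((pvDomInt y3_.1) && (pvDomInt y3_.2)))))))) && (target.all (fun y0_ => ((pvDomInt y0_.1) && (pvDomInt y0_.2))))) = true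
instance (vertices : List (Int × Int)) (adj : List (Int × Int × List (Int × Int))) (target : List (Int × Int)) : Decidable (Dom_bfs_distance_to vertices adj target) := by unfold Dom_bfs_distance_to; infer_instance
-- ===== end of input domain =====

-- B replaces A's FIFO-queue BFS (dist[u] = dist[v]+1) by a level-synchronous BFS with an
-- explicit level counter; the reverse-adjacency build is shared verbatim by both programs.
-- A mutates nothing observable; equivalence is about the returned dict (as an item list).

-- ===== PORT A =====
-- adj is Python's dict parameter as a flattened association list; lookup = first match.
def pvAdjD (adj : List (Int × Int × List (Int × Int))) : PySem.Dict (Int × Int) (List (Int × Int)) :=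
  PySem.Dict.mk (adj.map (fun t => ((t.1, t.2.1), t.2.2)))

-- shared by both Pythons verbatim: radj = {v: [] for v in vertices}; for u in vertices: for v in adj[u]: radj[v].append(u)
-- (adj[u] and radj[v] raise KeyError on a missing key in Python; Pre_ excludes those inputs,
-- inside Pre_ the getD/modify below are exact.)
def pvRadj (vertices : List (Int × Int)) (adj : List (Int × Int × List (Int × Int))) : PySem.Dict (Int × Int) (List (Int × Int)) :=
  let radj0 := vertices.foldl (fun d v => d.insert v []) PySem.Dict.empty
  vertices.foldl (fun radj u =>
    ((pvAdjD adj).getD u []).foldl (fun radj v => radj.modify v [] (· ++ [u])) radj) radj0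

-- termination measure for both BFS loops: reverse-adjacency values not yet in dist
def pvUnseen (radj : PySem.Dict (Int × Int) (List (Int × Int))) (dist : PySem.Dict (Int × Int) Int) : Nat :=
  ((radj.values.flatten).filter (fun u => !(dist.get? u).isSome)).length

theorem pvMem_flatten_of_getD (radj : PySem.Dict (Int × Int) (List (Int × Int))) (v u : Int × Int)
    (hu : u ∈ radj.getD v []) : u ∈ radj.values.flatten := by
  cases h : radj.get? v with
  | none => rw [PySem.Dict.getD_eq_get?_getD, h] at hu; cases hu
  | some l =>
      rw [PySem.Dict.getD_eq_get?_getD, h] at hu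
      exact List.mem_flatten.2 ⟨l, List.mem_map.2 ⟨_, PySem.Dict.mem_items_of_get?_eq_some _ h, rfl⟩, hu⟩

theorem pvUnseen_insert_lt (radj : PySem.Dict (Int × Int) (List (Int × Int)))
    (dist : PySem.Dict (Int × Int) Int) (u : Int × Int) (c : Int)
    (hu : u ∈ radj.values.flatten) (hn : (dist.get? u).isSome = false) :
    pvUnseen radj (dist.insert u c) < pvUnseen radj dist := by
  unfold pvUnseen
  obtain ⟨s, t, hst⟩ := List.append_of_mem hu
  rw [hst]
  simp only [List.filter_append, List.filter_cons, List.length_append]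
  have h1 : ∀ l : List (Int × Int),
      (l.filter (fun w => !((dist.insert u c).get? w).isSome)).length ≤
      (l.filter (fun w => !(dist.get? w).isSome)).length := by
    intro l
    rw [← List.countP_eq_length_filter, ← List.countP_eq_length_filter]
    apply List.countP_mono_left
    intro w _ hw
    rw [PySem.Dict.get?_insert] at hw
    split at hw
    · simp at hw
    · exact hw
  have hu2 : (!((dist.insert u c).get? u).isSome) = false := by
    simp [PySem.Dict.get?_insert_self]
  have hu1 : (!(dist.get? u).isSome) = true := by simp [hn]
  rw [hu1, hu2, if_pos rfl, if_neg Bool.false_ne_true]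
  simp only [List.length_cons]
  have := h1 s; have := h1 t; omega

-- one fold step of either BFS inner loop only ever inserts an unseen key: generic bound,
-- instantiated for A's and B's loops below to justify termination.
theorem pvScanG_unseen (radj : PySem.Dict (Int × Int) (List (Int × Int)))
    (f : PySem.Dict (Int × Int) Int → (Int × Int) → Int) (l : List (Int × Int))
    (hl : ∀ u ∈ l, u ∈ radj.values.flatten) :
    ∀ p : PySem.Dict (Int × Int) Int × List (Int × Int),
      pvUnseen radj (l.foldl (fun p u => if (p.1.get? u).isSome then p
          else (p.1.insert u (f p.1 u), p.2 ++ [u])) p).1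
        + (l.foldl (fun p u => if (p.1.get? u).isSome then p
          else (p.1.insert u (f p.1 u), p.2 ++ [u])) p).2.length
      ≤ pvUnseen radj p.1 + p.2.length := by
  induction l with
  | nil => intro p; simp [List.foldl]
  | cons u t ih =>
      intro p
      simp only [List.foldl_cons]
      cases h : (p.1.get? u).isSome with
      | true =>
        rw [if_pos rfl]
        exact ih (fun w hw => hl w (List.mem_cons_of_mem _ hw)) p
      | false =>
        rw [if_neg Bool.false_ne_true]
        have hlt := pvUnseen_insert_lt radj p.1 u (f p.1 u)
          (hl u (List.mem_cons_self ..)) h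
        have := ih (fun w hw => hl w (List.mem_cons_of_mem _ hw))
          (p.1.insert u (f p.1 u), p.2 ++ [u])
        simp only [List.length_append, List.length_cons, List.length_nil] at this ⊢
        omega

-- A's BFS body for one popped vertex v: for u in radj[v]: if u not in dist: dist[u] = dist[v]+1; q.append(u)
-- (dist[v] is ported as (get? v).getD 0; inside Pre_ the queue invariant makes the lookup succeed.)
def pvStepA (radj : PySem.Dict (Int × Int) (List (Int × Int)))
    (dist : PySem.Dict (Int × Int) Int) (v : Int × Int) :
    PySem.Dict (Int × Int) Int × List (Int × Int) :=
  (radj.getD v []).foldl (fun p u => if (p.1.get? u).isSome then p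
      else (p.1.insert u ((p.1.get? v).getD 0 + 1), p.2 ++ [u])) (dist, [])

theorem pvStepA_unseen (radj : PySem.Dict (Int × Int) (List (Int × Int)))
    (dist : PySem.Dict (Int × Int) Int) (v : Int × Int) :
    pvUnseen radj (pvStepA radj dist v).1 + (pvStepA radj dist v).2.length ≤ pvUnseen radj dist := by
  have := pvScanG_unseen radj (fun dd _ => (dd.get? v).getD 0 + 1) (radj.getD v [])
    (fun u hu => pvMem_flatten_of_getD radj v u hu) (dist, [])
  simpa [pvStepA] using this

-- A's while-loop over the deque
def pvLoopA (radj : PySem.Dict (Int × Int) (List (Int × Int)))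
    (dist : PySem.Dict (Int × Int) Int) (q : List (Int × Int)) :
    PySem.Dict (Int × Int) Int :=
  match q with
  | [] => dist
  | v :: rest =>
      pvLoopA radj (pvStepA radj dist v).1 (rest ++ (pvStepA radj dist v).2)
termination_by pvUnseen radj dist + q.length
decreasing_by
  have := pvStepA_unseen radj dist v
  simp only [List.length_append, List.length_cons]
  omega

def bfs_distance_to (vertices : List (Int × Int)) (adj : List (Int × Int × List (Int × Int))) (target : List (Int × Int)) : List (Int × Int × Int) :=
  let radj := pvRadj vertices adj
  let dist := target.foldl (fun d v => d.insert v 0) PySem.Dict.empty  -- {v: 0 for v in target}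
  ((pvLoopA radj dist target).items).map (fun p => (p.1.1, p.1.2, p.2))

-- ===== PORT B =====
-- one whole level of B: for v in frontier: for u in radj[v]: if u not in dist: dist[u] = d; nxt.append(u)
def pvLevelB (radj : PySem.Dict (Int × Int) (List (Int × Int))) (d : Int)
    (frontier : List (Int × Int)) (dist : PySem.Dict (Int × Int) Int) :
    PySem.Dict (Int × Int) Int × List (Int × Int) :=
  frontier.foldl (fun p v =>
    (radj.getD v []).foldl (fun p u => if (p.1.get? u).isSome then p
        else (p.1.insert u d, p.2 ++ [u])) p) (dist, [])

theorem pvLevelB_unseen (radj : PySem.Dict (Int × Int) (List (Int × Int))) (d : Int)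
    (frontier : List (Int × Int)) :
    ∀ (dist : PySem.Dict (Int × Int) Int) (acc : List (Int × Int)), pvUnseen radj (frontier.foldl (fun p v =>
        (radj.getD v []).foldl (fun p u => if (p.1.get? u).isSome then p
            else (p.1.insert u d, p.2 ++ [u])) p) (dist, acc)).1
      + (frontier.foldl (fun p v =>
        (radj.getD v []).foldl (fun p u => if (p.1.get? u).isSome then p
            else (p.1.insert u d, p.2 ++ [u])) p) (dist, acc)).2.length
      ≤ pvUnseen radj dist + acc.length := by
  induction frontier with
  | nil => intro dist acc; simp [List.foldl]
  | cons v t ih =>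
      intro dist acc
      simp only [List.foldl_cons]
      have h1 := pvScanG_unseen radj (fun _ _ => d) (radj.getD v [])
        (fun u hu => pvMem_flatten_of_getD radj v u hu) (dist, acc)
      have h2 := ih ((radj.getD v []).foldl (fun p u => if (p.1.get? u).isSome then p
          else (p.1.insert u d, p.2 ++ [u])) (dist, acc)).1
        ((radj.getD v []).foldl (fun p u => if (p.1.get? u).isSome then p
          else (p.1.insert u d, p.2 ++ [u])) (dist, acc)).2
      simp only [Prod.mk.eta] at h2
      exact le_trans h2 h1

-- B's level-synchronous while-loop with the explicit level counter d
def pvLoopB (radj : PySem.Dict (Int × Int) (List (Int × Int)))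
    (dist : PySem.Dict (Int × Int) Int) (frontier : List (Int × Int)) (d : Int) :
    PySem.Dict (Int × Int) Int :=
  match frontier with
  | [] => dist
  | _ :: _ =>
      pvLoopB radj (pvLevelB radj (d + 1) frontier dist).1
        (pvLevelB radj (d + 1) frontier dist).2 (d + 1)
termination_by pvUnseen radj dist + frontier.length
decreasing_by
  have := pvLevelB_unseen radj (d + 1) frontier dist []
  simp only [pvLevelB]
  simp only [List.length_cons, List.length_nil] at this ⊢
  omega

def bfs_distance_to_alt (vertices : List (Int × Int)) (adj : List (Int × Int × List (Int × Int))) (target : List (Int × Int)) : List (Int × Int × Int) :=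
  let radj := pvRadj vertices adj
  let dist := target.foldl (fun d v => d.insert v 0) PySem.Dict.empty  -- {v: 0 for v in target}
  ((pvLoopB radj dist target 0).items).map (fun p => (p.1.1, p.1.2, p.2))

-- ===== PRECONDITION & SPEC =====
-- Pre_ excludes exactly the inputs on which Python A raises KeyError: a vertex missing from
-- adj, a successor of a vertex that is not itself a vertex, or a target outside the vertices.
def Pre_bfs_distance_to (vertices : List (Int × Int)) (adj : List (Int × Int × List (Int × Int))) (target : List (Int × Int)) : Prop :=
  (∀ u ∈ vertices, ((pvAdjD adj).get? u).isSome = true) ∧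
  (∀ u ∈ vertices, ∀ w ∈ (pvAdjD adj).getD u [], w ∈ vertices) ∧
  (∀ t ∈ target, t ∈ vertices)
instance (vertices : List (Int × Int)) (adj : List (Int × Int × List (Int × Int))) (target : List (Int × Int)) : Decidable (Pre_bfs_distance_to vertices adj target) := by unfold Pre_bfs_distance_to; infer_instance

def pvWitness_bfs_distance_to : (List (Int × Int)) × (List (Int × Int × List (Int × Int))) × (List (Int × Int)) :=
  ([(1, 2), (3, 4)], [(1, 2, [(3, 4)]), (3, 4, [])], [(3, 4)])

def Spec_bfs_distance_to (vertices : List (Int × Int)) (adj : List (Int × Int × List (Int × Int))) (target : List (Int × Int)) (out : List (Int × Int × Int)) : Prop := out = bfs_distance_to_alt vertices adj target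
instance (vertices : List (Int × Int)) (adj : List (Int × Int × List (Int × Int))) (target : List (Int × Int)) (out : List (Int × Int × Int)) : Decidable (Spec_bfs_distance_to vertices adj target out) := by unfold Spec_bfs_distance_to; infer_instance

-- ===== CLAIM (what is proved, stated in full; the proofs are below) =====
def Claim_equal_bfs_distance_to : Prop := ∀ (vertices : List (Int × Int)) (adj : List (Int × Int × List (Int × Int))) (target : List (Int × Int)), Dom_bfs_distance_to vertices adj target → Pre_bfs_distance_to vertices adj target → Spec_bfs_distance_to vertices adj target (bfs_distance_to vertices adj target)

-- ===== LEMMAS AND PROOFS =====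

-- shifting the accumulated output list out of the generic inner fold
theorem pvScanG_acc (f : PySem.Dict (Int × Int) Int → (Int × Int) → Int) (l : List (Int × Int)) :
    ∀ (dist : PySem.Dict (Int × Int) Int) (acc : List (Int × Int)), l.foldl (fun p u => if (p.1.get? u).isSome then p
        else (p.1.insert u (f p.1 u), p.2 ++ [u])) (dist, acc)
      = ((l.foldl (fun p u => if (p.1.get? u).isSome then p
        else (p.1.insert u (f p.1 u), p.2 ++ [u])) (dist, [])).1,
         acc ++ (l.foldl (fun p u => if (p.1.get? u).isSome then p
        else (p.1.insert u (f p.1 u), p.2 ++ [u])) (dist, [])).2) := by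
  induction l with
  | nil => intro dist acc; simp [List.foldl]
  | cons u t ih =>
      intro dist acc
      simp only [List.foldl_cons]
      cases h : (dist.get? u).isSome with
      | true => rw [if_pos rfl, if_pos rfl]; exact ih dist acc
      | false =>
        rw [if_neg Bool.false_ne_true, if_neg Bool.false_ne_true]
        rw [ih (dist.insert u (f dist u)) (acc ++ [u]),
            ih (dist.insert u (f dist u)) ([] ++ [u])]
        simp [List.append_assoc]

-- A's per-level accumulation: fold pvStepA over a frontier, concatenating discoveries
def pvProcA (radj : PySem.Dict (Int × Int) (List (Int × Int))) (frontier : List (Int × Int))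
    (p : PySem.Dict (Int × Int) Int × List (Int × Int)) :
    PySem.Dict (Int × Int) Int × List (Int × Int) :=
  frontier.foldl (fun p v => ((pvStepA radj p.1 v).1, p.2 ++ (pvStepA radj p.1 v).2)) p

theorem pvProcA_acc (radj : PySem.Dict (Int × Int) (List (Int × Int))) (frontier : List (Int × Int)) :
    ∀ (dist : PySem.Dict (Int × Int) Int) (acc : List (Int × Int)), pvProcA radj frontier (dist, acc)
      = ((pvProcA radj frontier (dist, [])).1, acc ++ (pvProcA radj frontier (dist, [])).2) := by
  induction frontier with
  | nil => intro dist acc; simp [pvProcA]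
  | cons v t ih =>
      intro dist acc
      simp only [pvProcA, List.foldl_cons] at ih ⊢
      rw [ih (pvStepA radj dist v).1 (acc ++ (pvStepA radj dist v).2),
          ih (pvStepA radj dist v).1 ([] ++ (pvStepA radj dist v).2)]
      simp [List.append_assoc]

-- FIFO restructuring: running A's queue loop on q1 ++ q2 first processes all of q1,
-- then continues with q2 followed by everything q1 discovered.
theorem pvLoopA_restructure (radj : PySem.Dict (Int × Int) (List (Int × Int))) :
    ∀ (q1 q2 : List (Int × Int)) (dist : PySem.Dict (Int × Int) Int),
      pvLoopA radj dist (q1 ++ q2)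
        = pvLoopA radj (pvProcA radj q1 (dist, [])).1 (q2 ++ (pvProcA radj q1 (dist, [])).2) := by
  intro q1
  induction q1 with
  | nil => intro q2 dist; simp [pvProcA]
  | cons v t ih =>
      intro q2 dist
      rw [List.cons_append, pvLoopA, List.append_assoc,
        ih (q2 ++ (pvStepA radj dist v).2) (pvStepA radj dist v).1]
      have hproc : pvProcA radj (v :: t) (dist, []) =
          ((pvProcA radj t ((pvStepA radj dist v).1, [])).1,
            (pvStepA radj dist v).2 ++ (pvProcA radj t ((pvStepA radj dist v).1, [])).2) := by
        have h := pvProcA_acc radj t (pvStepA radj dist v).1 ([] ++ (pvStepA radj dist v).2)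
        simp only [pvProcA, List.foldl_cons] at h ⊢
        simp only [List.nil_append] at h ⊢
        rw [h]
      rw [hproc]
      simp [List.append_assoc]

-- per-vertex expansion: with every already-discovered frontier neighbour carrying d+1 and v
-- carrying d, A's inner fold (value dist[v]+1) equals B's inner fold (value d+1), lookups are
-- preserved, and every emitted vertex carries d+1 afterwards.
theorem pvScan_AB (v : Int × Int) (d : Int) (l : List (Int × Int)) :
    ∀ p : PySem.Dict (Int × Int) Int × List (Int × Int),
      p.1.get? v = some d →
      (∀ u ∈ p.2, p.1.get? u = some (d + 1)) →
      (l.foldl (fun p u => if (p.1.get? u).isSome then p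
          else (p.1.insert u ((p.1.get? v).getD 0 + 1), p.2 ++ [u])) p
        = l.foldl (fun p u => if (p.1.get? u).isSome then p
          else (p.1.insert u (d + 1), p.2 ++ [u])) p) ∧
      (∀ w x, p.1.get? w = some x →
        (l.foldl (fun p u => if (p.1.get? u).isSome then p
          else (p.1.insert u ((p.1.get? v).getD 0 + 1), p.2 ++ [u])) p).1.get? w = some x) ∧
      (∀ u ∈ (l.foldl (fun p u => if (p.1.get? u).isSome then p
          else (p.1.insert u ((p.1.get? v).getD 0 + 1), p.2 ++ [u])) p).2,
        (l.foldl (fun p u => if (p.1.get? u).isSome then p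
          else (p.1.insert u ((p.1.get? v).getD 0 + 1), p.2 ++ [u])) p).1.get? u = some (d + 1)) := by
  induction l with
  | nil =>
      intro p hv hacc
      exact ⟨rfl, fun w x hw => hw, hacc⟩
  | cons u t ih =>
      intro p hv hacc
      simp only [List.foldl_cons]
      cases h : (p.1.get? u).isSome with
      | true =>
        rw [if_pos rfl, if_pos rfl]
        exact ih p hv hacc
      | false =>
        rw [if_neg Bool.false_ne_true, if_neg Bool.false_ne_true]
        have hne : ∀ w x, p.1.get? w = some x → w ≠ u := by
          intro w x hw hwu; subst hwu; rw [hw] at h; simp at h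
        have hval : (p.1.get? v).getD 0 + 1 = d + 1 := by rw [hv]; rfl
        rw [hval]
        have hp' : ∀ w x, p.1.get? w = some x → (p.1.insert u (d + 1)).get? w = some x := by
          intro w x hw
          rw [PySem.Dict.get?_insert]
          split
          · exact absurd (by assumption) (hne w x hw)
          · exact hw
        have hv' : (p.1.insert u (d + 1)).get? v = some d := hp' v d hv
        have hacc' : ∀ w ∈ p.2 ++ [u], (p.1.insert u (d + 1)).get? w = some (d + 1) := by
          intro w hw
          rcases List.mem_append.1 hw with hw | hw
          · exact hp' w _ (hacc w hw)
          · simp only [List.mem_singleton] at hw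
            subst hw; exact PySem.Dict.get?_insert_self _ _ _
        obtain ⟨hAB, hpres, hout⟩ := ih (p.1.insert u (d + 1), p.2 ++ [u]) hv' hacc'
        exact ⟨hAB, fun w x hw => hpres w x (hp' w x hw), hout⟩

-- whole-level equality: A's queue drain of one frontier equals B's level expansion
theorem pvLevel_AB (radj : PySem.Dict (Int × Int) (List (Int × Int))) (d : Int)
    (frontier : List (Int × Int)) :
    ∀ p : PySem.Dict (Int × Int) Int × List (Int × Int),
      (∀ v ∈ frontier, p.1.get? v = some d) →
      (∀ u ∈ p.2, p.1.get? u = some (d + 1)) →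
      (pvProcA radj frontier p
        = frontier.foldl (fun p v =>
            (radj.getD v []).foldl (fun p u => if (p.1.get? u).isSome then p
                else (p.1.insert u (d + 1), p.2 ++ [u])) p) p) ∧
      (∀ w x, p.1.get? w = some x → (pvProcA radj frontier p).1.get? w = some x) ∧
      (∀ u ∈ (pvProcA radj frontier p).2, (pvProcA radj frontier p).1.get? u = some (d + 1)) := by
  induction frontier with
  | nil =>
      intro p hf hacc
      exact ⟨rfl, fun w x hw => hw, hacc⟩
  | cons v t ih =>
      intro p hf hacc
      have hv : p.1.get? v = some d := hf v (List.mem_cons_self ..)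
      -- relate pvStepA (which starts at (p.1, [])) to the inline fold starting at p
      have hstep : ((pvStepA radj p.1 v).1, p.2 ++ (pvStepA radj p.1 v).2)
          = (radj.getD v []).foldl (fun p u => if (p.1.get? u).isSome then p
              else (p.1.insert u ((p.1.get? v).getD 0 + 1), p.2 ++ [u])) p := by
        rw [show p = (p.1, p.2) from rfl,
          pvScanG_acc (fun dd _ => (dd.get? v).getD 0 + 1) (radj.getD v []) p.1 p.2]
        rfl
      obtain ⟨hAB, hpres, hout⟩ := pvScan_AB v d (radj.getD v []) p hv hacc
      set pA := (radj.getD v []).foldl (fun p u => if (p.1.get? u).isSome then p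
          else (p.1.insert u ((p.1.get? v).getD 0 + 1), p.2 ++ [u])) p with hpA
      have hf' : ∀ w ∈ t, pA.1.get? w = some d := fun w hw => hpres w d (hf w (List.mem_cons_of_mem _ hw))
      have hv'' : pA.1.get? v = some d := hpres v d hv
      obtain ⟨hAB2, hpres2, hout2⟩ := ih pA hf' hout
      have hblock : pvProcA radj (v :: t) p = pvProcA radj t pA := by
        simp only [pvProcA, List.foldl_cons]
        have : ((pvStepA radj p.1 v).1, p.2 ++ (pvStepA radj p.1 v).2) = pA := by
          rw [hstep, hpA]
        rw [this]
      constructor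
      · rw [hblock, hAB2, List.foldl_cons]
        have hstart : pA = (radj.getD v []).foldl (fun p u => if (p.1.get? u).isSome then p
            else (p.1.insert u (d + 1), p.2 ++ [u])) p := by rw [hpA, ← hAB]
        rw [hstart]
      · rw [hblock]
        exact ⟨fun w x hw => hpres2 w x (hpres w x hw), hout2⟩

-- main equivalence of the two loops, by induction on the termination measure
theorem pvLoop_AB (radj : PySem.Dict (Int × Int) (List (Int × Int))) :
    ∀ (n : ℕ) (dist : PySem.Dict (Int × Int) Int) (frontier : List (Int × Int)) (d : Int),
      pvUnseen radj dist + frontier.length ≤ n →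
      (∀ v ∈ frontier, dist.get? v = some d) →
      pvLoopA radj dist frontier = pvLoopB radj dist frontier d := by
  intro n
  induction n with
  | zero =>
      intro dist frontier d hm hf
      have : frontier = [] := by cases frontier <;> simp_all
      subst this
      rw [pvLoopA, pvLoopB]
  | succ n ih =>
      intro dist frontier d hm hf
      cases frontier with
      | nil => rw [pvLoopA, pvLoopB]
      | cons v t =>
          obtain ⟨hAB, _, hout⟩ := pvLevel_AB radj d (v :: t) (dist, []) hf (by simp)
          set P := pvProcA radj (v :: t) (dist, []) with hP
          have hlhs : pvLoopA radj dist (v :: t) = pvLoopA radj P.1 P.2 := by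
            have := pvLoopA_restructure radj (v :: t) [] dist
            simpa using this
          have hlevel : P = pvLevelB radj (d + 1) (v :: t) dist := by
            rw [hAB]; rfl
          have hmeas : pvUnseen radj P.1 + P.2.length ≤ pvUnseen radj dist := by
            rw [hlevel]
            exact (by simpa using pvLevelB_unseen radj (d + 1) (v :: t) dist [])
          have hrec : pvLoopA radj P.1 P.2 = pvLoopB radj P.1 P.2 (d + 1) := by
            apply ih P.1 P.2 (d + 1)
            · simp only [List.length_cons] at hm; omega
            · exact hout
          rw [hlhs, hrec, hlevel]
          conv_rhs => rw [pvLoopB]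

-- the dict comprehension {v: 0 for v in target}: every target key looks up to 0
theorem pvDist0_get (l : List (Int × Int)) :
    ∀ d0 : PySem.Dict (Int × Int) Int,
      (∀ w x, d0.get? w = some x → x = 0) →
      (∀ w x, (l.foldl (fun d v => d.insert v 0) d0).get? w = some x → x = 0) ∧
      (∀ v ∈ l, (l.foldl (fun d v => d.insert v 0) d0).get? v = some 0) := by
  induction l with
  | nil => intro d0 h0; exact ⟨h0, by simp⟩
  | cons v t ih =>
      intro d0 h0
      simp only [List.foldl_cons]
      have h0' : ∀ w x, (d0.insert v 0).get? w = some x → x = 0 := by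
        intro w x hw
        rw [PySem.Dict.get?_insert] at hw
        split at hw
        · injection hw with h; omega
        · exact h0 w x hw
      obtain ⟨ha, hb⟩ := ih (d0.insert v 0) h0'
      refine ⟨ha, ?_⟩
      intro w hw
      rcases List.mem_cons.1 hw with hwv | hw
      · -- w may or may not be reinserted later; its value is 0 either way
        cases hres : (t.foldl (fun d v => d.insert v 0) (d0.insert v 0)).get? w with
        | none =>
            -- impossible: v was inserted and keys are never removed
            exfalso
            have : ∀ (t : List (Int × Int)) (d : PySem.Dict (Int × Int) Int) (w : Int × Int) (x : Int),
                d.get? w = some x → ((t.foldl (fun d v => d.insert v 0) d).get? w).isSome := by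
              intro t
              induction t with
              | nil => intro d w x hw; simp [List.foldl, hw]
              | cons a s ihs =>
                  intro d w x hw
                  simp only [List.foldl_cons]
                  by_cases hwa : w = a
                  · subst hwa
                    exact ihs (d.insert w 0) w 0 (PySem.Dict.get?_insert_self _ _ _)
                  · exact ihs (d.insert a 0) w x (by rw [PySem.Dict.get?_insert]; simp [hwa, hw])
            have h1 := this t (d0.insert v 0) w 0 (by rw [hwv]; exact PySem.Dict.get?_insert_self _ _ _)
            rw [hres] at h1; simp at h1
        | some x => rw [ha w x hres]
      · exact hb w hw

-- ===== VERDICT (by name: the statement is the Claim_ definition above) =====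
theorem bfs_distance_to_spec : Claim_equal_bfs_distance_to := by
  intro vertices adj target _ _
  unfold Spec_bfs_distance_to bfs_distance_to bfs_distance_to_alt
  obtain ⟨_, hmem⟩ := pvDist0_get target PySem.Dict.empty (by intro w x h; simp [PySem.Dict.get?_empty] at h)
  have h := pvLoop_AB (pvRadj vertices adj)
    (pvUnseen (pvRadj vertices adj) (target.foldl (fun d v => d.insert v 0) PySem.Dict.empty) + target.length)
    (target.foldl (fun d v => d.insert v 0) PySem.Dict.empty) target 0 (le_refl _) hmem
  show ((pvLoopA (pvRadj vertices adj) (target.foldl (fun d v => d.insert v 0) PySem.Dict.empty) target).items).map (fun p => (p.1.1, p.1.2, p.2))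
      = ((pvLoopB (pvRadj vertices adj) (target.foldl (fun d v => d.insert v 0) PySem.Dict.empty) target 0).items).map (fun p => (p.1.1, p.1.2, p.2))
  rw [h]
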